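-- pv_equiv track=rewrite | github.com/agent-hanju/task-pipeliner | sample/taxonomy-converter/text_rules.py | strip_trailing_non_sentence_lines
-- ===== SOURCE A (Python) =====
-- _SYMBOL_START_CHARS = frozenset("※■□▪▫▶▷◀◁►◄▸◂●○◆◇△▲▽▼→←↑↓↗↘↙↖★☆·•ㆍ・☞☛◉◎")
--
-- def is_valid_sentence_line(line: str) -> bool:
--     """Check if a line is a valid sentence.
--
--     Valid if: ends with '.' and does not start with a symbol character.
--     """
--     stripped = line.strip()
--     if not stripped:
--         return False
--     if stripped[0] in _SYMBOL_START_CHARS: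
--         return False
--     return stripped.endswith(".")
--
-- def strip_trailing_non_sentence_lines(text: str) -> str:
--     """Remove trailing lines that are not valid sentences."""
--     lines = text.split("\n")
--     end = len(lines)
--     for i in range(len(lines) - 1, -1, -1):
--         if lines[i].strip() == "":
--             continue
--         if is_valid_sentence_line(lines[i]):
--             end = i + 1
--             break
--     else:
--         return text
--     return "\n".join(lines[:end])
-- ===== SOURCE B (Python) =====
-- _SYMBOL_START_CHARS = frozenset("※■□▪▫▶▷◀◁►◄▸◂●○◆◇△▲▽▼→←↑↓↗↘↙↖★☆·•ㆍ・☞☛◉◎")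
--
-- def is_valid_sentence_line(line: str) -> bool:
--     stripped = line.strip()
--     if not stripped:
--         return False
--     if stripped[0] in _SYMBOL_START_CHARS:
--         return False
--     return stripped.endswith(".")
--
-- def strip_trailing_non_sentence_lines(text: str) -> str:
--     lines = text.split("\n")
--     valid = [i for i, line in enumerate(lines) if is_valid_sentence_line(line)]
--     if not valid:
--         return text
--     return "\n".join(lines[:valid[-1] + 1])
-- ===== Notes on version B (the rewrite author's own statement) =====
-- stated objective: alternative
-- what changed: Replaced the backward early-exit break/else scan by a forward pass that builds the list of valid-sentence line indices and slices at its last element.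
import Mathlib
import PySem

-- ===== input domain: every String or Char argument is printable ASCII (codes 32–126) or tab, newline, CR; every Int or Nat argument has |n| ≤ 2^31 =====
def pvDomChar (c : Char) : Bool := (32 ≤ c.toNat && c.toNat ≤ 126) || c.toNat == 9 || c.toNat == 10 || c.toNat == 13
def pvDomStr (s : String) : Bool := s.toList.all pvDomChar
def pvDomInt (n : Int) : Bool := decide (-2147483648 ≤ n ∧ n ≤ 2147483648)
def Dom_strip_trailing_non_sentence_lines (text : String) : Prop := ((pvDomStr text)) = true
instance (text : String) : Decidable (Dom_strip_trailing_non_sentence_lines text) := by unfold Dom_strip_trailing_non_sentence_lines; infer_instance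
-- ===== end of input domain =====

-- B replaces A's backward early-exit scan by a forward index table (indices of valid
-- sentence lines) plus one slice at the last valid index: a different decomposition
-- of the same cutoff, same value everywhere (objective: alternative, not faster).

-- ===== PORT A =====
-- shared same-module helper (both Pythons use the identical is_valid_sentence_line)
def pv_symbol_chars : List Char :=
  "※■□▪▫▶▷◀◁►◄▸◂●○◆◇△▲▽▼→←↑↓↗↘↙↖★☆·•ㆍ・☞☛◉◎".toList

def is_valid_sentence_line (line : String) : Bool :=
  let stripped := PySem.Str.strip line
  match stripped.toList with
  | [] => false                                    -- 'if not stripped: return False'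
  | c :: _ =>                                      -- 'stripped[0] in _SYMBOL_START_CHARS'
    if pv_symbol_chars.contains c then false
    else PySem.Str.endswith stripped "."

-- A's 'for i in range(len(lines)-1, -1, -1)' loop with continue/break/else:
-- returns some end on break, none when the loop falls through (for-else).
def pvFindA (lines : List String) : Nat → Option Nat
  | 0 => none
  | n + 1 =>
    if PySem.Str.strip (lines.getD n "") == "" then pvFindA lines n       -- continue
    else if is_valid_sentence_line (lines.getD n "") then some (n + 1)    -- end = i+1; break
    else pvFindA lines n

def strip_trailing_non_sentence_lines (text : String) : String :=
  let lines := (PySem.Str.split? text "\n").getD []   -- sep "\n" is nonempty, split? is always some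
  match pvFindA lines lines.length with
  | some e => PySem.Str.join "\n" (lines.take e)   -- '\n'.join(lines[:end])
  | none => text                                   -- for-else: return text

-- ===== PORT B =====
def strip_trailing_non_sentence_lines_alt (text : String) : String :=
  let lines := (PySem.Str.split? text "\n").getD []   -- sep "\n" is nonempty, split? is always some
  let valid := ((PySem.List.enumerate lines 0).filter
                  (fun p => is_valid_sentence_line p.2)).map (·.1)
  match valid.getLast? with
  | none => text
  -- L comes from enumerate starting at 0, hence L ≥ 0, so .toNat is exact here
  | some L => PySem.Str.join "\n" (lines.take (L.toNat + 1))

-- ===== PRECONDITION & SPEC =====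
def Spec_strip_trailing_non_sentence_lines (text : String) (out : String) : Prop := out = strip_trailing_non_sentence_lines_alt text
instance (text : String) (out : String) : Decidable (Spec_strip_trailing_non_sentence_lines text out) := by unfold Spec_strip_trailing_non_sentence_lines; infer_instance

-- ===== CLAIM (what is proved, stated in full; the proofs are below) =====
def Claim_equal_strip_trailing_non_sentence_lines : Prop := ∀ (text : String), Dom_strip_trailing_non_sentence_lines text → Spec_strip_trailing_non_sentence_lines text (strip_trailing_non_sentence_lines text)

-- ===== LEMMAS AND PROOFS =====

-- a blank (strip == "") line is never a valid sentence line
lemma blank_not_valid (line : String) (h : PySem.Str.strip line == "") :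
    is_valid_sentence_line line = false := by
  unfold is_valid_sentence_line
  have h' : PySem.Str.strip line = "" := by simpa using h
  rw [h']
  rfl

-- the continue-branch collapses: blank lines fail is_valid anyway
lemma pvFindA_succ (lines : List String) (n : Nat) :
    pvFindA lines (n + 1) =
      if is_valid_sentence_line (lines.getD n "") then some (n + 1)
      else pvFindA lines n := by
  by_cases hb : PySem.Str.strip (lines.getD n "") == ""
  · rw [blank_not_valid _ hb]
    simp only [pvFindA, hb, if_true, Bool.false_eq_true, if_false]
  · simp only [pvFindA, hb, Bool.false_eq_true, if_false]

-- the backward scan only looks at indices < n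
lemma pvFindA_append (xs : List String) (x : String) (n : Nat) (h : n ≤ xs.length) :
    pvFindA (xs ++ [x]) n = pvFindA xs n := by
  induction n with
  | zero => rfl
  | succ n ih =>
    have hn : n < xs.length := h
    rw [pvFindA_succ, pvFindA_succ, ih (Nat.le_of_lt hn),
      List.getD_append _ _ _ _ hn]

def pvBVal (lines : List String) : Option Int :=
  (((PySem.List.enumerate lines 0).filter (fun p => is_valid_sentence_line p.2)).map (·.1)).getLast?

-- main invariant: A's break result is B's last valid index + 1
lemma pvFindA_eq_bval (lines : List String) :
    pvFindA lines lines.length = (pvBVal lines).map (fun L => L.toNat + 1) := by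
  induction lines using List.reverseRecOn with
  | nil => rfl
  | append_singleton xs x ih =>
    rw [List.length_append, List.length_cons, List.length_nil, Nat.add_zero,
      pvFindA_succ, pvFindA_append xs x xs.length (le_refl _),
      List.getD_append_right xs [x] "" xs.length (le_refl _)]
    simp only [Nat.sub_self, List.getD_cons_zero]
    unfold pvBVal
    rw [PySem.List.enumerate_append]
    by_cases hv : is_valid_sentence_line x
    · rw [if_pos hv]
      simp [hv, PySem.List.enumerate, List.filter_append]
    · rw [if_neg hv, ih]
      unfold pvBVal
      simp [hv, PySem.List.enumerate, List.filter_append]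

-- ===== VERDICT (by name: the statement is the Claim_ definition above) =====
theorem strip_trailing_non_sentence_lines_spec : Claim_equal_strip_trailing_non_sentence_lines := by
  intro text _
  unfold Spec_strip_trailing_non_sentence_lines strip_trailing_non_sentence_lines
    strip_trailing_non_sentence_lines_alt
  show (match pvFindA ((PySem.Str.split? text "\n").getD [])
          ((PySem.Str.split? text "\n").getD []).length with
        | some e => PySem.Str.join "\n" (((PySem.Str.split? text "\n").getD []).take e)
        | none => text)
      = (match pvBVal ((PySem.Str.split? text "\n").getD []) with
        | none => text
        | some L => PySem.Str.join "\n" (((PySem.Str.split? text "\n").getD []).take (L.toNat + 1)))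
  rw [pvFindA_eq_bval]
  cases pvBVal ((PySem.Str.split? text "\n").getD []) <;> rfl
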